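-- pv_equiv track=rewrite | github.com/KKosukeee/CodingQuestions | LeetCode/1311_get_watched_videos_by_your_friends.py | bfs
-- ===== SOURCE A (Python) =====
-- from collections import Counter
-- from collections import deque
-- from typing import List
--
-- def bfs(watchedVideos: List[List[str]], friends: List[List[int]],
--         id: int, level: int) -> List[str]:
--   """
--   A solution using a BFS that runs in O(N+Mlog(M)) where N = # of friends and
--   M = # of videos in time and O(N+M) in space
--
--   Args:
--     watchedVideos:
--     friends:
--     id:
--     level:
--
--   Returns:
--
--   """
--   q, visited = deque([(id, level)]), set([id])
--   videos = []
--   while q: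
--     node, remain = q.popleft()
--     if remain == 0:
--       videos.extend(watchedVideos[node])
--       continue
--     for friend in friends[node]:
--       if friend not in visited:
--         q.append((friend, remain - 1))
--         visited.add(friend)
--
--   counter = Counter(videos)
--   return sorted(counter.keys(), key=lambda x: (counter[x], x))
-- ===== SOURCE B (Python) =====
-- from collections import Counter
-- from typing import List
--
-- def bfs(watchedVideos: List[List[str]], friends: List[List[int]],
--         id: int, level: int) -> List[str]:
--   """Level-synchronized frontier BFS: walk `level` generations of new friends,
--   then rank the videos watched by the final frontier."""
--   visited = {id}
--   frontier = [id]
--   for _ in range(level):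
--     if not frontier:
--       break
--     nxt = []
--     for n in frontier:
--       for f in friends[n]:
--         if f not in visited:
--           visited.add(f)
--           nxt.append(f)
--     frontier = nxt
--   videos = []
--   for n in frontier:
--     videos.extend(watchedVideos[n])
--   counter = Counter(videos)
--   return sorted(counter.keys(), key=lambda x: (counter[x], x))
-- ===== Notes on version B (the rewrite author's own statement) =====
-- stated objective: idiomatic
-- what changed: Replaces the (node, remain)-tagged deque BFS with a level-synchronized frontier BFS: loop exactly level generations, each building the next frontier from unvisited friends, then rank the final frontier's videos by (count, name).
-- outside the precondition, e.g. on bfs([['a']], [[]], 0, -1): A returns [], B returns ['a']; on bfs([['a'], ['b']], [[0], [5]], 0, 1): A returns [], B returns []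
import Mathlib
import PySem

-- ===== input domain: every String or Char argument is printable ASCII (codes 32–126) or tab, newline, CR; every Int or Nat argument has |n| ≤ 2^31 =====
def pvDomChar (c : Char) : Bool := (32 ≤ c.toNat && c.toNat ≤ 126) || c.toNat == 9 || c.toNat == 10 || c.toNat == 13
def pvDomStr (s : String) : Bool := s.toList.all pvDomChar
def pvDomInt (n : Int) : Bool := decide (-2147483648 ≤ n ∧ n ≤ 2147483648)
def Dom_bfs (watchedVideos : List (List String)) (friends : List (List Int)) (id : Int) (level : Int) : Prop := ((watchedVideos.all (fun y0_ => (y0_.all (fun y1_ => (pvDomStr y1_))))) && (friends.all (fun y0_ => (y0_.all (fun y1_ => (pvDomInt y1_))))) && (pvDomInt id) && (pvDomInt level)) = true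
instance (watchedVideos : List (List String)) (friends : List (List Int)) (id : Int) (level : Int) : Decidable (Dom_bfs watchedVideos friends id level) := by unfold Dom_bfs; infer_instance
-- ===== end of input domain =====

-- B replaces A's (node, remaining-level)-tagged deque BFS by a level-synchronized
-- frontier BFS (`level` generations of new friends), for a plainer, more idiomatic
-- traversal; the final (count, name) ranking of the frontier's videos is unchanged.

-- ===== PORT A =====

-- any element of friends[node] (Python indexing, default []) is an element of friends.flatten
lemma pv_mem_flatten (f : List (List Int)) (n x : Int) (hx : x ∈ PySem.List.pyGetD f n []) :
    x ∈ f.flatten := by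
  unfold PySem.List.pyGetD PySem.List.pyGet? at hx
  rcases h : PySem.List.pyIdx? f.length n with _ | j
  · rw [h] at hx; simp at hx
  · rw [h] at hx
    simp only [Option.bind_some] at hx
    rcases hg : f[j]? with _ | row
    · rw [hg] at hx; simp at hx
    · rw [hg] at hx
      simp only [Option.getD_some] at hx
      exact List.mem_flatten.mpr ⟨row, List.mem_of_getElem? hg, hx⟩

-- adding one fresh element of the (duplicate-free) universe U to the visited set
-- lowers the number of unvisited elements of U by exactly one
lemma pv_countP_add (U : List Int) (hU : U.Nodup) (s : PySem.Set Int) (a : Int)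
    (haU : a ∈ U) (has : a ∉ s) :
    List.countP (fun x => decide (x ∉ PySem.Set.add s a)) U + 1
      = List.countP (fun x => decide (x ∉ s)) U := by
  induction U with
  | nil => cases haU
  | cons u U ih =>
    rcases List.nodup_cons.mp hU with ⟨hu, hU'⟩
    rcases List.mem_cons.mp haU with rfl | haU'
    · have h1 : decide (a ∉ PySem.Set.add s a) = false := by
        simp [PySem.Set.mem_add]
      have h2 : decide (a ∉ s) = true := by simp [has]
      have h3 : List.countP (fun x => decide (x ∉ PySem.Set.add s a)) U
          = List.countP (fun x => decide (x ∉ s)) U := by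
        apply List.countP_congr
        intro x hxU
        have hxa : x ≠ a := fun h => hu (h ▸ hxU)
        simp [PySem.Set.mem_add, hxa]
      rw [List.countP_cons, List.countP_cons, h1, h2, h3]
      simp
    · have hua : u ≠ a := fun h => hu (h ▸ haU')
      have h1 : decide (u ∉ PySem.Set.add s a) = decide (u ∉ s) := by
        simp [PySem.Set.mem_add, hua]
      rw [List.countP_cons, List.countP_cons, h1]
      have := ih hU' haU'
      omega

-- A's inner loop over friends[node]: mark unvisited friends and append them to the queue
def bfsRow (row : List Int) (r : Int) (st : PySem.Set Int × List (Int × Int)) :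
    PySem.Set Int × List (Int × Int) :=
  row.foldl (fun st friend =>
    if PySem.Set.contains st.1 friend then st
    else (PySem.Set.add st.1 friend, st.2 ++ [(friend, r)])) st

-- queue length plus unvisited count never grows across A's inner loop
lemma pv_bfsRow_measure (f : List (List Int)) (row : List Int) (r : Int)
    (hrow : ∀ x ∈ row, x ∈ f.flatten) :
    ∀ (vis : PySem.Set Int) (q : List (Int × Int)),
    (bfsRow row r (vis, q)).2.length
        + List.countP (fun x => decide (x ∉ (bfsRow row r (vis, q)).1)) (PySem.List.dedup f.flatten)
      ≤ q.length + List.countP (fun x => decide (x ∉ vis)) (PySem.List.dedup f.flatten) := by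
  induction row with
  | nil => intro vis q; simp [bfsRow]
  | cons a row ih =>
    intro vis q
    have hrow' : ∀ x ∈ row, x ∈ f.flatten := fun x hx => hrow x (List.mem_cons_of_mem a hx)
    by_cases h : a ∈ vis
    · have : bfsRow (a :: row) r (vis, q) = bfsRow row r (vis, q) := by
        simp [bfsRow, h]
      rw [this]; exact ih hrow' vis q
    · have hnm : a ∉ vis := h
      have hstep : bfsRow (a :: row) r (vis, q)
          = bfsRow row r (PySem.Set.add vis a, q ++ [(a, r)]) := by
        simp [bfsRow, h]
      rw [hstep]
      have hcnt := pv_countP_add (PySem.List.dedup f.flatten) (PySem.List.nodup_dedup _)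
        vis a ((PySem.List.mem_dedup _ _).mpr (hrow a (List.mem_cons_self))) hnm
      have := ih hrow' (PySem.Set.add vis a) (q ++ [(a, r)])
      simp only [List.length_append, List.length_cons, List.length_nil] at this ⊢
      omega

-- A's while loop over the deque of (node, remaining-level) pairs
def bfsLoop (w : List (List String)) (f : List (List Int)) (q : List (Int × Int))
    (vis : PySem.Set Int) (videos : List String) : List String :=
  match q with
  | [] => videos
  | (node, remain) :: rest =>
    if remain = 0 then
      bfsLoop w f rest vis (videos ++ PySem.List.pyGetD w node [])
    else
      let st := bfsRow (PySem.List.pyGetD f node []) (remain - 1) (vis, rest)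
      bfsLoop w f st.2 st.1 videos
termination_by q.length + List.countP (fun x => decide (x ∉ vis)) (PySem.List.dedup f.flatten)
decreasing_by
  · simp only [List.length_cons]; omega
  · have := pv_bfsRow_measure f (PySem.List.pyGetD f node []) (remain - 1)
      (fun x hx => pv_mem_flatten f node x hx) vis rest
    simp only [List.length_cons]
    omega

-- shared tail of both Pythons: Counter(videos), then sorted(keys, key=lambda x: (counter[x], x))
def bfsFinish (videos : List String) : List String :=
  let counter := PySem.Dict.counter videos
  PySem.List.sorted2 (PySem.Dict.keys counter)
    (fun x => PySem.Dict.getD counter x 0) (fun x => x)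

def bfs (watchedVideos : List (List String)) (friends : List (List Int)) (id : Int) (level : Int) : List String :=
  bfsFinish (bfsLoop watchedVideos friends [(id, level)] (PySem.Set.ofList [id]) [])

-- ===== PORT B =====

-- B's inner loop over friends[n]: mark unvisited friends and append them to the next frontier
def bfsStepRow (st : PySem.Set Int × List Int) (row : List Int) : PySem.Set Int × List Int :=
  row.foldl (fun st fr =>
    if PySem.Set.contains st.1 fr then st
    else (PySem.Set.add st.1 fr, st.2 ++ [fr])) st

-- one generation: the next frontier built from all unvisited friends of the current one
def bfsStep (f : List (List Int)) (vis : PySem.Set Int) (cur : List Int) :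
    PySem.Set Int × List Int :=
  cur.foldl (fun st n => bfsStepRow st (PySem.List.pyGetD f n [])) (vis, [])

-- B's `for _ in range(level)` loop with its early break on an empty frontier
def bfsFrontier (f : List (List Int)) : Nat → List Int → PySem.Set Int → List Int
  | 0, cur, _ => cur
  | Nat.succ k, cur, vis =>
    if cur = [] then cur
    else
      let st := bfsStep f vis cur
      bfsFrontier f k st.2 st.1

def bfs_alt (watchedVideos : List (List String)) (friends : List (List Int)) (id : Int) (level : Int) : List String :=
  bfsFinish ((bfsFrontier friends level.toNat [id] (PySem.Set.ofList [id])).foldl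
    (fun videos n => videos ++ PySem.List.pyGetD watchedVideos n []) [])

-- ===== PRECONDITION & SPEC =====
-- Pre_ restricts to the problem's well-formed inputs: either level = 0 with id a valid
-- Python index into watchedVideos (only watchedVideos[id] is touched), or level ≥ 0 with
-- every person index (id and all friends entries) a valid Python index into both lists —
-- outside of that A raises IndexError whenever an out-of-range index is reached (it still
-- returns when such an index is never reached, e.g. in an unreachable row), and on a
-- negative level A pointlessly walks the whole graph and returns [] while B returns id's
-- own videos — a nonsense input nobody would specify.
def Pre_bfs (watchedVideos : List (List String)) (friends : List (List Int)) (id : Int) (level : Int) : Prop :=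
  (level = 0 ∧ -(watchedVideos.length : Int) ≤ id ∧ id < watchedVideos.length) ∨
  (0 ≤ level ∧
    -(min friends.length watchedVideos.length : Int) ≤ id ∧
    id < min friends.length watchedVideos.length ∧
    ∀ row ∈ friends, ∀ x ∈ row,
      -(min friends.length watchedVideos.length : Int) ≤ x ∧
      x < min friends.length watchedVideos.length)
instance (watchedVideos : List (List String)) (friends : List (List Int)) (id : Int) (level : Int) : Decidable (Pre_bfs watchedVideos friends id level) := by unfold Pre_bfs; infer_instance

def pvWitness_bfs : List (List String) × List (List Int) × Int × Int :=
  ([["a"], ["b", "c"]], [[1], [0]], 0, 1)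

def Spec_bfs (watchedVideos : List (List String)) (friends : List (List Int)) (id : Int) (level : Int) (out : List String) : Prop := out = bfs_alt watchedVideos friends id level
instance (watchedVideos : List (List String)) (friends : List (List Int)) (id : Int) (level : Int) (out : List String) : Decidable (Spec_bfs watchedVideos friends id level out) := by unfold Spec_bfs; infer_instance

-- ===== CLAIM (what is proved, stated in full; the proofs are below) =====
def Claim_equal_bfs : Prop := ∀ (watchedVideos : List (List String)) (friends : List (List Int)) (id : Int) (level : Int), Dom_bfs watchedVideos friends id level → Pre_bfs watchedVideos friends id level → Spec_bfs watchedVideos friends id level (bfs watchedVideos friends id level)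

-- ===== LEMMAS AND PROOFS =====

lemma pv_stepRow_acc : ∀ (row : List Int) (vis : PySem.Set Int) (nxt : List Int),
    bfsStepRow (vis, nxt) row
      = ((bfsStepRow (vis, []) row).1, nxt ++ (bfsStepRow (vis, []) row).2) := by
  intro row
  induction row with
  | nil => intro vis nxt; simp [bfsStepRow]
  | cons a row ih =>
    intro vis nxt
    by_cases h : a ∈ vis
    · have e1 : bfsStepRow (vis, nxt) (a :: row) = bfsStepRow (vis, nxt) row := by
        simp [bfsStepRow, h]
      have e2 : bfsStepRow (vis, ([] : List Int)) (a :: row) = bfsStepRow (vis, []) row := by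
        simp [bfsStepRow, h]
      rw [e1, e2, ih]
    · have e1 : bfsStepRow (vis, nxt) (a :: row)
          = bfsStepRow (PySem.Set.add vis a, nxt ++ [a]) row := by
        simp [bfsStepRow, h]
      have e2 : bfsStepRow (vis, ([] : List Int)) (a :: row)
          = bfsStepRow (PySem.Set.add vis a, [a]) row := by
        simp [bfsStepRow, h]
      rw [e1, e2, ih (PySem.Set.add vis a) (nxt ++ [a]), ih (PySem.Set.add vis a) [a]]
      simp

lemma pv_row_acc : ∀ (row : List Int) (r : Int) (vis : PySem.Set Int) (q : List (Int × Int)),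
    bfsRow row r (vis, q) = ((bfsRow row r (vis, [])).1, q ++ (bfsRow row r (vis, [])).2) := by
  intro row
  induction row with
  | nil => intro r vis q; simp [bfsRow]
  | cons a row ih =>
    intro r vis q
    by_cases h : a ∈ vis
    · have e1 : bfsRow (a :: row) r (vis, q) = bfsRow row r (vis, q) := by
        simp [bfsRow, h]
      have e2 : bfsRow (a :: row) r (vis, ([] : List (Int × Int))) = bfsRow row r (vis, []) := by
        simp [bfsRow, h]
      rw [e1, e2, ih]
    · have e1 : bfsRow (a :: row) r (vis, q)
          = bfsRow row r (PySem.Set.add vis a, q ++ [(a, r)]) := by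
        simp [bfsRow, h]
      have e2 : bfsRow (a :: row) r (vis, ([] : List (Int × Int)))
          = bfsRow row r (PySem.Set.add vis a, [(a, r)]) := by
        simp [bfsRow, h]
      rw [e1, e2, ih r (PySem.Set.add vis a) (q ++ [(a, r)]), ih r (PySem.Set.add vis a) [(a, r)]]
      simp

-- A's inner loop is B's inner loop with the remaining level glued onto each new node
lemma pv_row_eq_stepRow : ∀ (row : List Int) (r : Int) (vis : PySem.Set Int),
    bfsRow row r (vis, [])
      = ((bfsStepRow (vis, []) row).1,
         (bfsStepRow (vis, []) row).2.map (fun n => (n, r))) := by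
  intro row
  induction row with
  | nil => intro r vis; simp [bfsRow, bfsStepRow]
  | cons a row ih =>
    intro r vis
    by_cases h : a ∈ vis
    · have e1 : bfsRow (a :: row) r (vis, ([] : List (Int × Int))) = bfsRow row r (vis, []) := by
        simp [bfsRow, h]
      have e2 : bfsStepRow (vis, ([] : List Int)) (a :: row) = bfsStepRow (vis, []) row := by
        simp [bfsStepRow, h]
      rw [e1, e2, ih]
    · have e1 : bfsRow (a :: row) r (vis, ([] : List (Int × Int)))
          = bfsRow row r (PySem.Set.add vis a, [(a, r)]) := by
        simp [bfsRow, h]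
      have e2 : bfsStepRow (vis, ([] : List Int)) (a :: row)
          = bfsStepRow (PySem.Set.add vis a, [a]) row := by
        simp [bfsStepRow, h]
      rw [e1, e2, pv_row_acc row r (PySem.Set.add vis a) [(a, r)],
        pv_stepRow_acc row (PySem.Set.add vis a) [a], ih]
      simp

-- once the whole queue is at remaining level 0, A just concatenates the watched lists
lemma pv_loop_zero (w : List (List String)) (f : List (List Int)) :
    ∀ (cur : List Int) (vis : PySem.Set Int) (videos : List String),
    bfsLoop w f (cur.map (fun n => (n, (0 : Int)))) vis videos
      = videos ++ cur.flatMap (fun n => PySem.List.pyGetD w n []) := by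
  intro cur
  induction cur with
  | nil => intro vis videos; simp [bfsLoop]
  | cons n cur ih =>
    intro vis videos
    rw [List.map_cons, bfsLoop]
    rw [if_pos rfl]
    rw [ih vis (videos ++ PySem.List.pyGetD w n [])]
    simp

-- processing one whole generation of the queue equals one bfsStep generation of B
lemma pv_loop_level (w : List (List String)) (f : List (List Int)) :
    ∀ (front : List Int) (r : Int), r ≠ 0 →
    ∀ (vis : PySem.Set Int) (nxtAcc : List Int) (videos : List String),
    bfsLoop w f (front.map (fun n => (n, r)) ++ nxtAcc.map (fun n => (n, r - 1))) vis videos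
      = bfsLoop w f
          ((front.foldl (fun st n => bfsStepRow st (PySem.List.pyGetD f n [])) (vis, nxtAcc)).2.map
            (fun n => (n, r - 1)))
          (front.foldl (fun st n => bfsStepRow st (PySem.List.pyGetD f n [])) (vis, nxtAcc)).1
          videos := by
  intro front r hr
  induction front with
  | nil => intro vis nxtAcc videos; simp
  | cons n front ih =>
    intro vis nxtAcc videos
    rw [List.map_cons, List.cons_append, bfsLoop]
    have hst : bfsRow (PySem.List.pyGetD f n []) (r - 1)
        (vis, front.map (fun n => (n, r)) ++ nxtAcc.map (fun n => (n, r - 1)))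
        = ((bfsStepRow (vis, []) (PySem.List.pyGetD f n [])).1,
           front.map (fun n => (n, r)) ++
             (nxtAcc ++ (bfsStepRow (vis, []) (PySem.List.pyGetD f n [])).2).map
               (fun n => (n, r - 1))) := by
      rw [pv_row_acc, pv_row_eq_stepRow]
      simp [List.map_append]
    simp only [if_neg hr, hst]
    rw [ih (bfsStepRow (vis, []) (PySem.List.pyGetD f n [])).1
      (nxtAcc ++ (bfsStepRow (vis, []) (PySem.List.pyGetD f n [])).2) videos]
    rw [List.foldl_cons, pv_stepRow_acc (PySem.List.pyGetD f n []) vis nxtAcc]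

-- A's whole loop from a uniform queue at level r = the videos of B's frontier after r generations
lemma pv_loop_frontier (w : List (List String)) (f : List (List Int)) :
    ∀ (k : Nat) (r : Int), r.toNat = k → 0 ≤ r →
    ∀ (cur : List Int) (vis : PySem.Set Int) (videos : List String),
    bfsLoop w f (cur.map (fun n => (n, r))) vis videos
      = videos ++ (bfsFrontier f k cur vis).flatMap (fun n => PySem.List.pyGetD w n []) := by
  intro k
  induction k with
  | zero =>
    intro r hrk hr0 cur vis videos
    have hr : r = 0 := by omega
    subst hr
    rw [pv_loop_zero w f cur vis videos]
    rfl
  | succ k ih =>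
    intro r hrk hr0 cur vis videos
    have hr : r ≠ 0 := by omega
    by_cases hcur : cur = []
    · subst hcur
      simp [bfsLoop, bfsFrontier]
    · have h1 := pv_loop_level w f cur r hr vis [] videos
      simp only [List.map_nil, List.append_nil] at h1
      rw [h1]
      have hfold : cur.foldl (fun st n => bfsStepRow st (PySem.List.pyGetD f n []))
          (vis, ([] : List Int)) = bfsStep f vis cur := rfl
      rw [hfold]
      rw [ih (r - 1) (by omega) (by omega) (bfsStep f vis cur).2 (bfsStep f vis cur).1 videos]
      have hfr : bfsFrontier f (k + 1) cur vis
          = bfsFrontier f k (bfsStep f vis cur).2 (bfsStep f vis cur).1 := by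
        simp [bfsFrontier, hcur]
      rw [hfr]

-- ===== VERDICT (by name: the statement is the Claim_ definition above) =====
theorem bfs_spec : Claim_equal_bfs := by
  intro w f id level _ hpre
  have h0 : 0 ≤ level := by
    rcases hpre with ⟨h, _⟩ | ⟨h, _⟩
    · omega
    · exact h
  unfold Spec_bfs bfs bfs_alt
  have h := pv_loop_frontier w f level.toNat level rfl h0 [id] (PySem.Set.ofList [id]) []
  simp only [List.map_cons, List.map_nil] at h
  rw [h, PySem.List.foldl_append_eq_flatMap]
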